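-- pv_equiv track=rewrite | github.com/yaxsomo/dopynion-equipe-3 | src/app/legacy_template.py | _preview_counts
-- ===== SOURCE A (Python) =====
-- from collections.abc import Mapping
--
-- def _preview_counts(all_counts: Mapping[str, int]) -> dict[str, int]:
--     """Return a stable, curated preview of counts (e.g., stock pile counts)."""
--     if not all_counts:
--         return {}
--     # Focus on relevant Dominion piles used in our bot
--     preferred_order = [
--         "copper",
--         "silver",
--         "gold",
--         "estate",
--         "duchy",
--         "province",
--         "village",
--         "market",
--         "laboratory",
--         "festival",
--         "smithy",
--         "woodcutter",
--     ]
--     preview: dict[str, int] = {}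
--     for key in preferred_order:
--         if key in all_counts:
--             preview[key] = int(all_counts[key])
--     # Include any other keys not in the preferred list (sorted) as a safety net
--     for key in sorted(k for k in all_counts.keys() if k not in preview):
--         preview[key] = int(all_counts[key])
--     return preview
-- ===== SOURCE B (Python) =====
-- def _preview_counts(all_counts):
--     """Return a stable, curated preview of counts (e.g., stock pile counts)."""
--     preferred_order = [
--         "copper", "silver", "gold", "estate", "duchy", "province",
--         "village", "market", "laboratory", "festival", "smithy", "woodcutter",
--     ]
--     rank = {name: i for i, name in enumerate(preferred_order)}
--     ordered = sorted(all_counts, key=lambda k: (rank.get(k, len(preferred_order)), k))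
--     return {k: int(all_counts[k]) for k in ordered}
-- ===== Notes on version B (the rewrite author's own statement) =====
-- stated objective: idiomatic
-- what changed: A builds the preview in two passes (scan the preferred list inserting present keys, then a second sorted pass over the leftover keys); B precomputes a rank index and produces the whole key order with one sorted() call keyed by (rank.get(k, len(preferred_order)), k), then builds the dict in a single comprehension, dropping the empty-input guard.
import Mathlib
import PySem

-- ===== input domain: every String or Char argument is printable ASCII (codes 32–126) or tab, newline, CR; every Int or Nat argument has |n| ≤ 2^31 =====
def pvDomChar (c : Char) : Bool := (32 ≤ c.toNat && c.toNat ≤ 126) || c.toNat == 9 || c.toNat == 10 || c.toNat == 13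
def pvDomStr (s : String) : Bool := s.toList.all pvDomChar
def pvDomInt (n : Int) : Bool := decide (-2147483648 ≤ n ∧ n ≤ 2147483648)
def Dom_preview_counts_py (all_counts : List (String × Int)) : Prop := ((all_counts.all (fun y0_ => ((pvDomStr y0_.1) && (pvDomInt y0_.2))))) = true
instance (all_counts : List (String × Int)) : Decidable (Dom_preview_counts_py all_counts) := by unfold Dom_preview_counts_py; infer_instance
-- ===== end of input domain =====

-- B replaces A's two insertion passes by one sorted pass over all keys with a precomputed
-- (rank, name) key and a single dict-building loop (idiomatic; same asymptotic cost).


-- shared module constant: the literal preferred_order list both versions carry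
def preferredOrder : List String :=
  ["copper", "silver", "gold", "estate", "duchy", "province",
   "village", "market", "laboratory", "festival", "smithy", "woodcutter"]

-- ===== PORT A =====
def preview_counts_py (all_counts : List (String × Int)) : List (String × Int) :=
  let d : PySem.Dict String Int := PySem.Dict.mk all_counts
  if all_counts.isEmpty then [] else
  let preview : PySem.Dict String Int :=
    preferredOrder.foldl
      (fun pv key => if d.contains key then pv.insert key (d.getD key 0) else pv)
      PySem.Dict.empty
  let rest : List String :=
    PySem.List.sorted (d.keys.filter (fun k => !(preview.contains k))) (fun k => k) false
  let preview2 : PySem.Dict String Int :=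
    rest.foldl (fun pv key => pv.insert key (d.getD key 0)) preview
  preview2.items

-- ===== PORT B =====
-- B-side helper: rank = {name: i for i, name in enumerate(preferred_order)}
def rankDict : PySem.Dict String Int :=
  PySem.Dict.ofList ((PySem.List.enumerate preferredOrder).map (fun p => (p.2, p.1)))

def preview_counts_py_alt (all_counts : List (String × Int)) : List (String × Int) :=
  let d : PySem.Dict String Int := PySem.Dict.mk all_counts
  let ordered : List String :=
    PySem.List.sorted2 d.keys
      (fun k => rankDict.getD k (preferredOrder.length : Int)) (fun k => k) false
  (ordered.foldl (fun pv k => pv.insert k (d.getD k 0)) PySem.Dict.empty).items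

-- ===== PRECONDITION & SPEC =====
-- Pre_ excludes association lists with duplicate keys: they do not encode a Python dict
-- uniquely, so which occurrence of a repeated key counts is anybody's choice.
def Pre_preview_counts_py (all_counts : List (String × Int)) : Prop :=
  (all_counts.map Prod.fst).Nodup
instance (all_counts : List (String × Int)) : Decidable (Pre_preview_counts_py all_counts) := by
  unfold Pre_preview_counts_py; infer_instance
def pvWitness_preview_counts_py : (List (String × Int)) := [("copper", 3), ("zoo", 1)]

def Spec_preview_counts_py (all_counts : List (String × Int)) (out : List (String × Int)) : Prop := out = preview_counts_py_alt all_counts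
instance (all_counts : List (String × Int)) (out : List (String × Int)) : Decidable (Spec_preview_counts_py all_counts out) := by unfold Spec_preview_counts_py; infer_instance

-- ===== CLAIM (what is proved, stated in full; the proofs are below) =====
def Claim_equal_preview_counts_py : Prop := ∀ (all_counts : List (String × Int)), Dom_preview_counts_py all_counts → Pre_preview_counts_py all_counts → Spec_preview_counts_py all_counts (preview_counts_py all_counts)

-- ===== LEMMAS AND PROOFS =====

theorem preferredOrder_nodup : preferredOrder.Nodup := by decide

theorem rankDict_keys : rankDict.keys = preferredOrder := by decide

theorem rank_getD_of_not_mem (k : String) (hk : k ∉ preferredOrder) :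
    rankDict.getD k 12 = 12 := by
  refine PySem.Dict.getD_of_get?_eq_none _ _ ?_
  refine (PySem.Dict.get?_eq_none_iff_not_mem_keys _ _).mpr ?_
  rw [rankDict_keys]; exact hk

theorem rank_getD_lt_of_mem (k : String) (hk : k ∈ preferredOrder) :
    rankDict.getD k 12 < 12 := by
  fin_cases hk <;> decide

theorem preferredOrder_rank_pairwise :
    preferredOrder.Pairwise (fun a b => rankDict.getD a 12 < rankDict.getD b 12) := by
  decide

-- sorted2 with linearly ordered key types is sorted with the lexicographic pair key
theorem sorted2_eq_sorted_toLex {α κ₁ κ₂ : Type} [LinearOrder κ₁] [LinearOrder κ₂]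
    (xs : List α) (k1 : α → κ₁) (k2 : α → κ₂) :
    PySem.List.sorted2 xs k1 k2 false
      = PySem.List.sorted xs (fun x => toLex (k1 x, k2 x)) false := by
  have hlt : (fun (a b : α) => decide (k1 a < k1 b) || (!decide (k1 b < k1 a) && decide (k2 a < k2 b)))
      = (fun (a b : α) => decide (toLex (k1 a, k2 a) < toLex (k1 b, k2 b))) := by
    funext a b
    rcases lt_trichotomy (k1 a) (k1 b) with h | h | h
    · simp [h, Prod.Lex.lt_iff, asymm h]
    · simp [h, Prod.Lex.lt_iff]
    · simp [h, Prod.Lex.lt_iff, asymm h, h.ne']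
  show xs.foldl (fun acc x => PySem.List.insertBy
      (fun a b => decide (k1 a < k1 b) || (!decide (k1 b < k1 a) && decide (k2 a < k2 b))) x acc) []
    = xs.foldl (fun acc x => PySem.List.insertBy
      (fun a b => decide (toLex (k1 a, k2 a) < toLex (k1 b, k2 b))) x acc) []
  rw [hlt]

-- the core equivalence, for an arbitrary dict with distinct keys
theorem core (d : PySem.Dict String Int) (hnd : d.keys.Nodup) :
    (let preview : PySem.Dict String Int :=
       preferredOrder.foldl
         (fun pv key => if d.contains key then pv.insert key (d.getD key 0) else pv)
         PySem.Dict.empty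
     let rest : List String :=
       PySem.List.sorted (d.keys.filter (fun k => !(preview.contains k))) (fun k => k) false
     (rest.foldl (fun pv key => pv.insert key (d.getD key 0)) preview).items)
  = (let ordered : List String :=
       PySem.List.sorted2 d.keys
         (fun k => rankDict.getD k (preferredOrder.length : Int)) (fun k => k) false
     (ordered.foldl (fun pv k => pv.insert k (d.getD k 0)) PySem.Dict.empty).items) := by
  dsimp only
  have hfold1 : preferredOrder.foldl
      (fun pv key => if d.contains key then pv.insert key (d.getD key 0) else pv)
      PySem.Dict.empty
      = (preferredOrder.filter (fun k => d.contains k)).foldl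
          (fun pv key => pv.insert key (d.getD key 0)) PySem.Dict.empty := by
    rw [List.foldl_filter]
  rw [hfold1]
  set P : List String := preferredOrder.filter (fun k => d.contains k) with hP
  have hPnd : P.Nodup := preferredOrder_nodup.filter _
  have hPsub : ∀ a ∈ P, a ∈ d.keys := by
    intro a ha
    have h2 := (List.mem_filter.mp ha).2
    rw [PySem.Dict.contains_eq_decide_mem_keys] at h2
    exact of_decide_eq_true h2
  have hPmem : ∀ a, a ∈ P ↔ (a ∈ preferredOrder ∧ a ∈ d.keys) := by
    intro a
    constructor
    · intro ha; exact ⟨(List.mem_filter.mp ha).1, hPsub a ha⟩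
    · rintro ⟨h1, h2⟩
      refine List.mem_filter.mpr ⟨h1, ?_⟩
      rw [PySem.Dict.contains_eq_decide_mem_keys]; exact decide_eq_true h2
  set pv1 : PySem.Dict String Int :=
    P.foldl (fun pv key => pv.insert key (d.getD key 0)) PySem.Dict.empty with hpv1
  have hitems1 : pv1.items = P.map (fun k => (k, d.getD k 0)) := by
    rw [hpv1, PySem.Dict.items_foldl_insert_fresh P (fun k => k) (fun k => d.getD k 0)
      PySem.Dict.empty (fun a _ => PySem.Dict.contains_empty a) (by simpa using hPnd)]
    simp [PySem.Dict.empty]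
  have hkeys1 : pv1.keys = P := by
    simp only [PySem.Dict.keys, hitems1, List.map_map]
    show List.map (fun k => k) P = P
    simp
  have hcont1 : ∀ k, pv1.contains k = decide (k ∈ P) := by
    intro k; rw [PySem.Dict.contains_eq_decide_mem_keys, hkeys1]
  have hfiltfun : (fun k => !(pv1.contains k)) = (fun k => !(decide (k ∈ P))) := by
    funext k; rw [hcont1]
  rw [hfiltfun]
  set RF : List String := d.keys.filter (fun k => !(decide (k ∈ P))) with hRF'
  have hRFnd : RF.Nodup := hnd.filter _
  set S : List String := PySem.List.sorted RF (fun k => k) false with hS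
  have hSperm : S.Perm RF := PySem.List.sorted_perm _ _ _
  have hSnd : S.Nodup := hSperm.symm.nodup hRFnd
  have hSmem : ∀ a, a ∈ S ↔ (a ∈ d.keys ∧ a ∉ P) := by
    intro a
    rw [hSperm.mem_iff, hRF', List.mem_filter]
    simp
  have hSnp : ∀ a ∈ S, a ∉ preferredOrder := by
    intro a ha hmem
    have h := (hSmem a).mp ha
    exact h.2 ((hPmem a).mpr ⟨hmem, h.1⟩)
  have hAitems : (S.foldl (fun pv key => pv.insert key (d.getD key 0)) pv1).items
      = (P ++ S).map (fun k => (k, d.getD k 0)) := by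
    rw [PySem.Dict.items_foldl_insert_fresh S (fun k => k) (fun k => d.getD k 0) pv1
      (by
        intro a ha
        rw [hcont1]
        exact decide_eq_false ((hSmem a).mp ha).2) (by simpa using hSnd)]
    rw [hitems1, List.map_append]
  -- B side: the sorted2 order is exactly P ++ S
  have hord : PySem.List.sorted2 d.keys
      (fun k => rankDict.getD k (preferredOrder.length : Int)) (fun k => k) false = P ++ S := by
    rw [sorted2_eq_sorted_toLex]
    apply PySem.List.sorted_eq_of_perm_of_pairwise_lt
    · -- (P ++ S).Perm d.keys
      refine ((List.Perm.append_left P hSperm).trans ?_)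
      have hnd2 : (P ++ RF).Nodup := by
        refine List.Nodup.append hPnd hRFnd ?_
        intro a haP haRF
        have := (List.mem_filter.mp (hRF' ▸ haRF)).2
        simp at this
        exact this haP
      rw [List.perm_ext_iff_of_nodup hnd2 hnd]
      intro a
      rw [List.mem_append]
      constructor
      · rintro (h | h)
        · exact hPsub a h
        · exact (List.mem_filter.mp h).1
      · intro h
        by_cases hp : a ∈ P
        · exact Or.inl hp
        · exact Or.inr (List.mem_filter.mpr ⟨h, by simpa using hp⟩)
    · -- strict lexicographic increase along P ++ S
      rw [List.pairwise_append]
      refine ⟨?_, ?_, ?_⟩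
      · refine List.Pairwise.imp ?_ (preferredOrder_rank_pairwise.filter (fun k => d.contains k))
        intro a b h
        refine Prod.Lex.lt_iff.mpr ?_
        exact Or.inl h
      · have hle : S.Pairwise (fun a b => a ≤ b) := PySem.List.sorted_pairwise RF (fun k => k)
        have hne : S.Pairwise (fun a b => a ≠ b) := hSnd
        refine List.Pairwise.imp_of_mem ?_ (hle.and hne)
        intro a b ha hb h
        refine Prod.Lex.lt_iff.mpr (Or.inr ⟨?_, lt_of_le_of_ne h.1 h.2⟩)
        show rankDict.getD a 12 = rankDict.getD b 12
        rw [rank_getD_of_not_mem a (hSnp a ha), rank_getD_of_not_mem b (hSnp b hb)]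
      · intro a ha b hb
        refine Prod.Lex.lt_iff.mpr (Or.inl ?_)
        show rankDict.getD a 12 < rankDict.getD b 12
        rw [rank_getD_of_not_mem b (hSnp b hb)]
        exact rank_getD_lt_of_mem a (List.mem_filter.mp ha).1
  rw [hord, hAitems]
  have hPSnd : (P ++ S).Nodup := by
    refine List.Nodup.append hPnd hSnd ?_
    intro a haP haS
    exact ((hSmem a).mp haS).2 haP
  rw [PySem.Dict.items_foldl_insert_fresh (P ++ S) (fun k => k) (fun k => d.getD k 0)
    PySem.Dict.empty (fun a _ => PySem.Dict.contains_empty a) (by simpa using hPSnd)]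
  simp [PySem.Dict.empty]

-- ===== VERDICT (by name: the statement is the Claim_ definition above) =====
theorem preview_counts_py_spec : Claim_equal_preview_counts_py := by
  intro xs _hdom hpre
  show preview_counts_py xs = preview_counts_py_alt xs
  cases xs with
  | nil => decide
  | cons p rest =>
    have hnd : (PySem.Dict.mk (p :: rest) : PySem.Dict String Int).keys.Nodup := by
      rw [PySem.Dict.keys_mk]; exact hpre
    simpa only [preview_counts_py, preview_counts_py_alt, List.isEmpty_cons,
      Bool.false_eq_true, if_false] using core (PySem.Dict.mk (p :: rest)) hnd
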